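-- pv_equiv track=rewrite | github.com/mstendorf/adventofcode | day6/main2.py | find_longest_hold_time
-- ===== SOURCE A (Python) =====
-- def find_longest_hold_time(time, distance):
--     low = 0
--     high = time
--     while low < high:
--         mid = (low + high) // 2
--         if mid * (time - mid) > distance:
--             low = mid + 1
--         else:
--             high = mid
--
--     return low
-- ===== SOURCE B (Python) =====
-- def find_longest_hold_time(time, distance):
--     for x in range(time - 1, -1, -1):
--         if x * (time - x) > distance:
--             return x + 1
--     return 0
-- ===== Notes on version B (the rewrite author's own statement) =====
-- stated objective: simpler
-- what changed: Replaced the binary search over [0, time] with a single descending linear scan that returns x+1 at the first (largest) x in [time-1, 0] with x*(time-x) > distance, else 0.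
import Mathlib
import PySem

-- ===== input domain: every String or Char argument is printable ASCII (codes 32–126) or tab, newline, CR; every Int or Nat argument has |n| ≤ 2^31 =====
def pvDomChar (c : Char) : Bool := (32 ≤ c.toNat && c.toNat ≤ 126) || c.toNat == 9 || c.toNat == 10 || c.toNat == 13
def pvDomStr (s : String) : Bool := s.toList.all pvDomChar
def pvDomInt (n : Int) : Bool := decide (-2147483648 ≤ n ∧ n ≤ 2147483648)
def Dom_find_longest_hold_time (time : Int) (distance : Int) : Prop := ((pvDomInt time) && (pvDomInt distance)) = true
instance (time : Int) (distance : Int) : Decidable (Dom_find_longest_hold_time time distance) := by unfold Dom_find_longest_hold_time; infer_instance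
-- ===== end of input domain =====

-- B replaces A's binary search by a single descending linear scan for the largest winning
-- hold time; objective: simpler (no speed claim).

-- ===== PORT A =====
-- midpoint: Python's (low+high)//2 equals Int ediv by 2 (cited by the port's decreasing_by)
theorem pvMidEq (low high : Int) :
    PySem.Int.floordiv (low + high) 2 = (low + high) / 2 :=
  PySem.Int.floordiv_eq_ediv_of_pos (by omega)

-- the `while low < high` loop of A, step for step
def find_longest_hold_time_loop (time : Int) (distance : Int) (low : Int) (high : Int) : Int :=
  if low < high then
    let mid := PySem.Int.floordiv (low + high) 2
    if mid * (time - mid) > distance then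
      find_longest_hold_time_loop time distance (mid + 1) high
    else
      find_longest_hold_time_loop time distance low mid
  else low
termination_by (high - low).toNat
decreasing_by
  · rw [pvMidEq]; omega
  · rw [pvMidEq]; omega

def find_longest_hold_time (time : Int) (distance : Int) : Int :=
  find_longest_hold_time_loop time distance 0 time

-- ===== PORT B =====
-- the `for x in range(time-1, -1, -1)` loop of B, step for step
def find_longest_hold_time_alt_loop (time : Int) (distance : Int) (x : Int) : Int :=
  if 0 ≤ x then
    if x * (time - x) > distance then x + 1
    else find_longest_hold_time_alt_loop time distance (x - 1)
  else 0
termination_by (x + 1).toNat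
decreasing_by omega

def find_longest_hold_time_alt (time : Int) (distance : Int) : Int :=
  find_longest_hold_time_alt_loop time distance (time - 1)

-- ===== PRECONDITION & SPEC =====
def Spec_find_longest_hold_time (time : Int) (distance : Int) (out : Int) : Prop := out = find_longest_hold_time_alt time distance
instance (time : Int) (distance : Int) (out : Int) : Decidable (Spec_find_longest_hold_time time distance out) := by unfold Spec_find_longest_hold_time; infer_instance

-- ===== CLAIM (what is proved, stated in full; the proofs are below) =====
def Claim_equal_find_longest_hold_time : Prop := ∀ (time : Int) (distance : Int), Dom_find_longest_hold_time time distance → Spec_find_longest_hold_time time distance (find_longest_hold_time time distance)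

-- ===== LEMMAS AND PROOFS =====

-- one unfolded step of A's loop with the midpoint written as ediv
theorem loop_step (t d low high : Int) (h : low < high) :
    find_longest_hold_time_loop t d low high =
      if (low + high) / 2 * (t - (low + high) / 2) > d
      then find_longest_hold_time_loop t d ((low + high) / 2 + 1) high
      else find_longest_hold_time_loop t d low ((low + high) / 2) := by
  rw [find_longest_hold_time_loop, if_pos h, pvMidEq]

theorem loop_done (t d low high : Int) (h : ¬ low < high) :
    find_longest_hold_time_loop t d low high = low := by
  rw [find_longest_hold_time_loop, if_neg h]

-- B's scan returns a nonnegative value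
theorem alt_nonneg (t d x : Int) : 0 ≤ find_longest_hold_time_alt_loop t d x := by
  rw [find_longest_hold_time_alt_loop]
  split_ifs with h1 h2
  · omega
  · exact alt_nonneg t d (x - 1)
  · omega
termination_by (x + 1).toNat
decreasing_by omega

-- B's scan returns at most x+1
theorem alt_le (t d x : Int) (h : -1 ≤ x) : find_longest_hold_time_alt_loop t d x ≤ x + 1 := by
  rw [find_longest_hold_time_alt_loop]
  split_ifs with h1 h2
  · omega
  · have := alt_le t d (x - 1) (by omega)
    omega
  · omega
termination_by (x + 1).toNat
decreasing_by omega

-- any winner y ∈ [0,x] forces the result above y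
theorem alt_ge (t d x y : Int) (h0 : 0 ≤ y) (hyx : y ≤ x) (hw : y * (t - y) > d) :
    y + 1 ≤ find_longest_hold_time_alt_loop t d x := by
  rw [find_longest_hold_time_alt_loop]
  have hx : 0 ≤ x := by omega
  rw [if_pos hx]
  split_ifs with h2
  · omega
  · have hne : y ≠ x := fun he => h2 (he ▸ hw)
    exact alt_ge t d (x - 1) y h0 (by omega) hw
termination_by (x + 1).toNat
decreasing_by omega

-- a positive result z means z-1 is a winner
theorem alt_winner (t d x z : Int) (hz : find_longest_hold_time_alt_loop t d x = z)
    (h1 : 1 ≤ z) : (z - 1) * (t - (z - 1)) > d := by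
  rw [find_longest_hold_time_alt_loop] at hz
  split_ifs at hz with ha hb
  · have hzx : z - 1 = x := by omega
    rw [hzx]; exact hb
  · exact alt_winner t d (x - 1) z hz h1
  · omega
termination_by (x + 1).toNat
decreasing_by omega

-- peak bound: every x*(t-x) is at most m*(t-m) at the integer peak m = t/2
theorem peak_bound (t x : Int) : x * (t - x) ≤ t / 2 * (t - t / 2) := by
  have hm : 2 * (t / 2) ≤ t ∧ t ≤ 2 * (t / 2) + 1 := by omega
  by_cases h : x ≤ t / 2
  · nlinarith [mul_nonneg (by omega : (0:Int) ≤ t / 2 - x) (by omega : (0:Int) ≤ t - t / 2 - x)]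
  · nlinarith [mul_nonneg (by omega : (0:Int) ≤ x - t / 2) (by omega : (0:Int) ≤ x + t / 2 - t)]

-- all-losers case: A's loop halves high down to 0
theorem loop_all_lose (t d : Int) (hall : ∀ x, 0 ≤ x → x ≤ t - 1 → x * (t - x) ≤ d) :
    ∀ high, high ≤ t → find_longest_hold_time_loop t d 0 high = 0 := by
  intro high hht
  by_cases h : (0:Int) < high
  · rw [loop_step t d 0 high h]
    have hmid : 0 ≤ (0 + high) / 2 ∧ (0 + high) / 2 < high := by omega
    rw [if_neg (by
      have := hall ((0 + high) / 2) hmid.1 (by omega)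
      omega)]
    exact loop_all_lose t d hall ((0 + high) / 2) (by omega)
  · exact loop_done t d 0 high h
termination_by high => high.toNat
decreasing_by omega

-- main invariant argument for the nonempty case: the loop's state is either the initial
-- (0, t) or has low strictly right of the integer peak, where the win predicate is monotone
theorem loop_eq_alt (t d : Int) (ht : 1 ≤ t) (hne : t / 2 * (t - t / 2) > d)
    (low high : Int) (h0 : 0 ≤ low) (hht : high ≤ t)
    (hlr : low ≤ find_longest_hold_time_alt_loop t d (t - 1))
    (hrh : find_longest_hold_time_alt_loop t d (t - 1) ≤ high)
    (hinv : (low = 0 ∧ high = t) ∨ t / 2 + 1 ≤ low) :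
    find_longest_hold_time_loop t d low high = find_longest_hold_time_alt_loop t d (t - 1) := by
  by_cases hlt : low < high
  · rw [loop_step t d low high hlt]
    have hmid : low ≤ (low + high) / 2 ∧ (low + high) / 2 < high := by omega
    by_cases hw : (low + high) / 2 * (t - (low + high) / 2) > d
    · rw [if_pos hw]
      have hge := alt_ge t d (t - 1) ((low + high) / 2) (by omega) (by omega) hw
      refine loop_eq_alt t d ht hne ((low + high) / 2 + 1) high (by omega) hht hge hrh ?_
      rcases hinv with ⟨hl0, hh0⟩ | hm
      · right; omega
      · right; omega
    · rw [if_neg hw]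
      have hm : t / 2 + 1 ≤ low := by
        rcases hinv with ⟨hl0, hh0⟩ | hm
        · exfalso; apply hw
          have : (low + high) / 2 = t / 2 := by omega
          rw [this]; exact hne
        · exact hm
      -- the result is at most mid: any winner above mid would beat mid on the
      -- descending side of the parabola
      have hle : find_longest_hold_time_alt_loop t d (t - 1) ≤ (low + high) / 2 := by
        by_contra hc
        push Not at hc
        set z := find_longest_hold_time_alt_loop t d (t - 1) with hzdef
        have hwz := alt_winner t d (t - 1) z rfl (by omega)
        have hy1 : (low + high) / 2 ≤ z - 1 := by omega
        have hy2 : z - 1 ≤ t - 1 := by omega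
        -- (z-1)*(t-(z-1)) ≤ mid*(t-mid) since z-1 ≥ mid and (z-1)+mid > t
        have : (z - 1) * (t - (z - 1)) ≤ (low + high) / 2 * (t - (low + high) / 2) := by
          nlinarith [mul_nonneg (by omega : (0:Int) ≤ (z - 1) - (low + high) / 2)
            (by omega : (0:Int) ≤ (z - 1) + (low + high) / 2 - t)]
        omega
      exact loop_eq_alt t d ht hne low ((low + high) / 2) h0 (by omega) hlr hle (Or.inr hm)
  · rw [loop_done t d low high hlt]
    omega
termination_by (high - low).toNat
decreasing_by
  · omega
  · omega

-- ===== VERDICT (by name: the statement is the Claim_ definition above) =====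
theorem find_longest_hold_time_spec : Claim_equal_find_longest_hold_time := by
  intro t d _
  unfold Spec_find_longest_hold_time find_longest_hold_time find_longest_hold_time_alt
  by_cases ht : 1 ≤ t
  · by_cases hne : t / 2 * (t - t / 2) > d
    · exact loop_eq_alt t d ht hne 0 t (by omega) le_rfl
        (alt_nonneg t d (t - 1)) (by have := alt_le t d (t - 1) (by omega); omega)
        (Or.inl ⟨rfl, rfl⟩)
    · push Not at hne
      have hall : ∀ x, 0 ≤ x → x ≤ t - 1 → x * (t - x) ≤ d := fun x _ _ =>
        le_trans (peak_bound t x) hne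
      have hD0 : find_longest_hold_time_alt_loop t d (t - 1) = 0 := by
        by_contra hc
        have hpos : 1 ≤ find_longest_hold_time_alt_loop t d (t - 1) := by
          have := alt_nonneg t d (t - 1); omega
        have hwz := alt_winner t d (t - 1) _ rfl hpos
        have hle := alt_le t d (t - 1) (by omega)
        have := hall (find_longest_hold_time_alt_loop t d (t - 1) - 1) (by omega) (by omega)
        omega
      rw [hD0, loop_all_lose t d hall t le_rfl]
  · rw [loop_done t d 0 t (by omega)]
    rw [find_longest_hold_time_alt_loop, if_neg (by omega)]
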